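-- pv_equiv track=rewrite | github.com/muratatak77/Leetcode-Solutions-by-Pyhton | sorting/uplevel/sorting/Lexicographical Order/hash_map.py | solve
-- ===== SOURCE A (Python) =====
-- def solve(arr):
--
--     sum_map = {}
--     val_map = {}
--
--     for i in range(len(arr)):
--         splt = arr[i].split( )
--         key = splt[0]
--         value = splt[1]
--
--         if key in sum_map:
--             sum_map[key] += 1
--             val_map[key] = max(value, val_map[key])
--         else:
--             sum_map[key] = 1
--             val_map[key] = value
--
--
--     arr.clear()
--
--     for x in sum_map.keys():
--         item = x + ":" + str(sum_map[x]) + ":" +val_map[x]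
--         arr.append(item)
--
--     return arr
-- ===== SOURCE B (Python) =====
-- def solve(arr):
--     groups = {}
--     for line in arr:
--         splt = line.split()
--         groups.setdefault(splt[0], []).append(splt[1])
--     out = [k + ":" + str(len(vals)) + ":" + max(vals) for k, vals in groups.items()]
--     arr.clear()
--     arr.extend(out)
--     return arr
-- ===== Notes on version B (the rewrite author's own statement) =====
-- stated objective: alternative
-- what changed: Instead of streaming a per-key counter and running max through two parallel dicts, B builds one insertion-ordered dict of full value lists in a single pass and aggregates (len and max) only when formatting the output; Pre_ excludes lines that split into fewer than two tokens, on which A raises IndexError.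
import Mathlib
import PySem

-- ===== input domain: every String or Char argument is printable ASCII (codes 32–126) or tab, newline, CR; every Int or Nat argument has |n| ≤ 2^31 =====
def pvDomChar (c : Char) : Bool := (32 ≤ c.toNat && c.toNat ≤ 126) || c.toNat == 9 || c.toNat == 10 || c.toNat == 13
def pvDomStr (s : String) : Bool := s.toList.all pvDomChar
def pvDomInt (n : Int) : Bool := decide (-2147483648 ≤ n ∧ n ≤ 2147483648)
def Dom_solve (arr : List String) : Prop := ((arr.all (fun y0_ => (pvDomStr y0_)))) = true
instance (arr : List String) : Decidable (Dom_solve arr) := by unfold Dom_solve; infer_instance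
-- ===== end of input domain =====

-- B groups the lines into one dict of full value lists and aggregates (count, max) only
-- when formatting, instead of A's streaming counter + running max in two parallel dicts
-- (alternative decomposition, same cost). Both Pythons rebuild the input list in place;
-- the equivalence proved here is about the return value.

-- ===== PORT A =====
def solve (arr : List String) : List String :=
  let maps := arr.foldl
    (fun (sv : PySem.Dict String Int × PySem.Dict String String) line =>
      let splt := PySem.Str.split₀ line
      let key := PySem.List.pyGetD splt 0 ""
      let value := PySem.List.pyGetD splt 1 ""
      if sv.1.contains key then
        (sv.1.insert key (sv.1.getD key 0 + 1),
         sv.2.insert key (max value (sv.2.getD key "")))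
      else
        (sv.1.insert key 1, sv.2.insert key value))
    (PySem.Dict.empty, PySem.Dict.empty)
  maps.1.keys.foldl
    (fun acc x => acc ++ [x ++ ":" ++ PySem.Int.toStr (maps.1.getD x 0) ++ ":" ++ maps.2.getD x ""])
    []

-- ===== PORT B =====
def solve_alt (arr : List String) : List String :=
  let groups := arr.foldl
    (fun (g : PySem.Dict String (List String)) line =>
      let splt := PySem.Str.split₀ line
      g.modify (PySem.List.pyGetD splt 0 "") [] (· ++ [PySem.List.pyGetD splt 1 ""]))
    PySem.Dict.empty
  groups.items.map
    (fun p => p.1 ++ ":" ++ PySem.Int.toStr (p.2.length : Int) ++ ":" ++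
              (PySem.List.max? p.2 (fun x => x)).getD "")

-- ===== PRECONDITION & SPEC =====
-- Pre_ excludes exactly the inputs on which A raises IndexError: a line whose
-- whitespace split has fewer than two tokens.
def Pre_solve (arr : List String) : Prop := ∀ s ∈ arr, 2 ≤ (PySem.Str.split₀ s).length
instance (arr : List String) : Decidable (Pre_solve arr) := by unfold Pre_solve; infer_instance
def pvWitness_solve : List String := ["a b", "a c x", "z q", "a a"]

def Spec_solve (arr : List String) (out : List String) : Prop := out = solve_alt arr
instance (arr : List String) (out : List String) : Decidable (Spec_solve arr out) := by unfold Spec_solve; infer_instance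

-- ===== CLAIM (what is proved, stated in full; the proofs are below) =====
def Claim_equal_solve : Prop := ∀ (arr : List String), Dom_solve arr → Pre_solve arr → Spec_solve arr (solve arr)

-- ===== LEMMAS AND PROOFS =====

-- the invariant linking A's two dicts to B's group dict
def InvSolve (s : PySem.Dict String Int) (v : PySem.Dict String String)
    (g : PySem.Dict String (List String)) : Prop :=
  g.keys.Nodup ∧ s.keys = g.keys ∧
  (∀ k, g.contains k = true → g.getD k [] ≠ []) ∧
  (∀ k, s.getD k 0 = ((g.getD k []).length : Int)) ∧
  (∀ k, v.getD k "" = (PySem.List.max? (g.getD k []) (fun x => x)).getD "")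

lemma foldl_append_map (l : List String) (f : String → String) (acc : List String) :
    l.foldl (fun acc x => acc ++ [f x]) acc = acc ++ l.map f := by
  induction l generalizing acc with
  | nil => simp
  | cons x t ih => simp [List.foldl_cons, ih, List.append_assoc]

lemma max?_snoc (x : String) (t : List String) (value : String) :
    (PySem.List.max? (x :: t ++ [value]) (fun y => y)).getD "" =
      max value ((PySem.List.max? (x :: t) (fun y => y)).getD "") := by
  rw [show (x :: t ++ [value]) = x :: (t ++ [value]) from rfl,
      PySem.List.max?_id_cons, PySem.List.max?_id_cons]
  simp [List.foldl_append, max_comm]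

lemma max?_nil_getD : (PySem.List.max? ([] : List String) (fun x => x)).getD "" = "" := by
  rw [(PySem.List.max?_eq_none_iff ([] : List String) (fun x => x)).mpr rfl]
  rfl

lemma inv_step (s : PySem.Dict String Int) (v : PySem.Dict String String)
    (g : PySem.Dict String (List String)) (key value : String)
    (h : InvSolve s v g) :
    InvSolve
      (if s.contains key then s.insert key (s.getD key 0 + 1) else s.insert key 1)
      (if s.contains key then v.insert key (max value (v.getD key "")) else v.insert key value)
      (g.modify key [] (· ++ [value])) := by
  obtain ⟨hnd, hkeys, hne, hs, hv⟩ := h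
  have hcont : s.contains key = g.contains key := by
    rw [PySem.Dict.contains_eq_decide_mem_keys, PySem.Dict.contains_eq_decide_mem_keys, hkeys]
  simp only [PySem.Dict.modify]
  by_cases hc : g.contains key = true
  · have hsc : s.contains key = true := hcont.trans hc
    rw [if_pos hsc, if_pos hsc]
    obtain ⟨x, t, hxt⟩ : ∃ x t, g.getD key [] = x :: t := by
      cases hg : g.getD key [] with
      | nil => exact absurd hg (hne key hc)
      | cons x t => exact ⟨x, t, rfl⟩
    refine ⟨?_, ?_, ?_, ?_, ?_⟩
    · rwa [PySem.Dict.keys_insert_of_contains _ _ hc]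
    · rw [PySem.Dict.keys_insert_of_contains _ _ hsc, PySem.Dict.keys_insert_of_contains _ _ hc, hkeys]
    · intro k hk
      rw [PySem.Dict.getD_insert]
      split_ifs with hkk
      · simp
      · rw [PySem.Dict.contains_insert] at hk
        simp only [Bool.or_eq_true, beq_iff_eq] at hk
        exact hne k (hk.resolve_left hkk)
    · intro k
      rw [PySem.Dict.getD_insert, PySem.Dict.getD_insert]
      split_ifs with hkk
      · rw [hs key]; simp
      · exact hs k
    · intro k
      rw [PySem.Dict.getD_insert, PySem.Dict.getD_insert]
      split_ifs with hkk
      · rw [hv key, hxt]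
        exact (max?_snoc x t value).symm
      · exact hv k
  · have hgc : g.contains key = false := by simpa using hc
    have hsc : s.contains key = false := hcont.trans hgc
    have hsc' : ¬ s.contains key = true := by simp [hsc]
    rw [if_neg hsc', if_neg hsc']
    have hgd : g.getD key [] = [] := PySem.Dict.getD_of_not_contains _ _ hgc
    refine ⟨?_, ?_, ?_, ?_, ?_⟩
    · rw [PySem.Dict.keys_insert_of_not_contains _ _ hgc]
      refine List.Nodup.append hnd (List.nodup_singleton key) ?_
      intro a ha hb
      simp only [List.mem_singleton] at hb
      subst hb
      rw [PySem.Dict.contains_eq_decide_mem_keys] at hgc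
      exact absurd ha (by simpa using hgc)
    · rw [PySem.Dict.keys_insert_of_not_contains _ _ hsc,
          PySem.Dict.keys_insert_of_not_contains _ _ hgc, hkeys]
    · intro k hk
      rw [PySem.Dict.getD_insert]
      split_ifs with hkk
      · simp
      · rw [PySem.Dict.contains_insert] at hk
        simp only [Bool.or_eq_true, beq_iff_eq] at hk
        exact hne k (hk.resolve_left hkk)
    · intro k
      rw [PySem.Dict.getD_insert, PySem.Dict.getD_insert]
      split_ifs with hkk
      · rw [hgd]; simp
      · exact hs k
    · intro k
      rw [PySem.Dict.getD_insert, PySem.Dict.getD_insert]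
      split_ifs with hkk
      · rw [hgd]
        simp [PySem.List.max?_id_cons]
      · exact hv k

lemma inv_fold (l : List String) (s : PySem.Dict String Int) (v : PySem.Dict String String)
    (g : PySem.Dict String (List String)) (h : InvSolve s v g) :
    InvSolve
      (l.foldl (fun (sv : PySem.Dict String Int × PySem.Dict String String) line =>
        let splt := PySem.Str.split₀ line
        let key := PySem.List.pyGetD splt 0 ""
        let value := PySem.List.pyGetD splt 1 ""
        if sv.1.contains key then
          (sv.1.insert key (sv.1.getD key 0 + 1),
           sv.2.insert key (max value (sv.2.getD key "")))
        else
          (sv.1.insert key 1, sv.2.insert key value)) (s, v)).1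
      (l.foldl (fun (sv : PySem.Dict String Int × PySem.Dict String String) line =>
        let splt := PySem.Str.split₀ line
        let key := PySem.List.pyGetD splt 0 ""
        let value := PySem.List.pyGetD splt 1 ""
        if sv.1.contains key then
          (sv.1.insert key (sv.1.getD key 0 + 1),
           sv.2.insert key (max value (sv.2.getD key "")))
        else
          (sv.1.insert key 1, sv.2.insert key value)) (s, v)).2
      (l.foldl (fun (g : PySem.Dict String (List String)) line =>
        let splt := PySem.Str.split₀ line
        g.modify (PySem.List.pyGetD splt 0 "") [] (· ++ [PySem.List.pyGetD splt 1 ""])) g) := by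
  induction l generalizing s v g with
  | nil => exact h
  | cons line t ih =>
    simp only [List.foldl_cons]
    have := inv_step s v g (PySem.List.pyGetD (PySem.Str.split₀ line) 0 "")
      (PySem.List.pyGetD (PySem.Str.split₀ line) 1 "") h
    by_cases hc : s.contains (PySem.List.pyGetD (PySem.Str.split₀ line) 0 "") = true
    · simpa [hc] using ih _ _ _ (by simpa [hc] using this)
    · simp only [Bool.not_eq_true] at hc
      simpa [hc] using ih _ _ _ (by simpa [hc] using this)

-- ===== VERDICT (by name: the statement is the Claim_ definition above) =====
theorem solve_spec : Claim_equal_solve := by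
  intro arr _ _
  unfold Spec_solve solve solve_alt
  have hinv := inv_fold arr PySem.Dict.empty PySem.Dict.empty PySem.Dict.empty
    ⟨by simp, by simp, by intro k hk; simp at hk, by intro k; simp,
     by intro k; simp [max?_nil_getD]⟩
  obtain ⟨hnd, hkeys, _, hs, hv⟩ := hinv
  simp only []
  rw [foldl_append_map, List.nil_append,
      PySem.Dict.items_eq_map_keys _ hnd ([] : List String), List.map_map, hkeys]
  refine List.map_congr_left ?_
  intro k _
  simp only [Function.comp]
  rw [hs k, hv k]
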